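-- pv_equiv track=rewrite | github.com/FuSE150/Encoding-and-Compression-Methods | Shannon-Fano_Encoding/main.py | shannon_fano_decode
-- ===== SOURCE A (Python) =====
-- def shannon_fano_decode(encoded_text, shannon_fano_codes):
--     reverse_shannon_fano_codes = {v: k for k, v in shannon_fano_codes.items()}
--
--     decoded_text = ""
--     buffer = ""
--     for bit in encoded_text:
--         buffer += bit
--         if buffer in reverse_shannon_fano_codes:
--             decoded_text += reverse_shannon_fano_codes[buffer]
--             buffer = ""
--
--     return decoded_text
-- ===== SOURCE B (Python) =====
-- def shannon_fano_decode(encoded_text, shannon_fano_codes):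
--     # Build a trie of the codes (reverse map): edges are code characters,
--     # a node holding key None is a complete code storing its symbol (last wins).
--     root = {}
--     for sym, code in shannon_fano_codes.items():
--         node = root
--         for ch in code:
--             node = node.setdefault(ch, {})
--         node[None] = sym
--     out = []
--     node = root
--     for bit in encoded_text:
--         node = node.get(bit)
--         if node is None:
--             # current path is not a prefix of any code: no further emission possible
--             break
--         if None in node:
--             out.append(node[None])
--             node = root
--     return ''.join(out)
-- ===== Notes on version B (the rewrite author's own statement) =====
-- stated objective: alternative
-- what changed: B builds a trie from the reverse code map (last-wins on duplicate codes) and decodes by walking it bit by bit with early stop on a dead end, instead of A's growing string buffer tested against a hash map at every bit.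
import Mathlib
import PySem

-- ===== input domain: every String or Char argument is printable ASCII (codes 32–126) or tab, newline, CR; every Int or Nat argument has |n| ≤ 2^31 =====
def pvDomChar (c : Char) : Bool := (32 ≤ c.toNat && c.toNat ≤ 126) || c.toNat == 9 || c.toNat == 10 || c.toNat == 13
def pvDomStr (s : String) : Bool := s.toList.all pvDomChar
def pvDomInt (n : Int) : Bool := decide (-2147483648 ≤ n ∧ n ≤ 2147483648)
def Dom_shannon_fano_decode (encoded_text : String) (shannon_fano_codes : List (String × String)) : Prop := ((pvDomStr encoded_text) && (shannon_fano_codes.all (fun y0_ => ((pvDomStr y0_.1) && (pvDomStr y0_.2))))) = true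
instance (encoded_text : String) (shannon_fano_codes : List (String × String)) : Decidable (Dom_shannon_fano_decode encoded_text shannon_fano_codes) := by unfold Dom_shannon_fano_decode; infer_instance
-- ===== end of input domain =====

-- B replaces A's growing-buffer dictionary scan by a trie over the reverse code map,
-- walked one bit at a time with early stop on a dead end (alternative data structure).

-- ===== PORT A =====
-- the per-bit loop of A: state (decoded, buffer), `buffer += bit; if buffer in rev: …`
def pvALoop (rev : PySem.Dict String String) :
    List Char → List Char → List Char → List Char
  | decoded, _buffer, [] => decoded
  | decoded, buffer, bit :: rest =>
    let buffer' := buffer ++ [bit]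
    match rev.get? (String.ofList buffer') with
    | some sym => pvALoop rev (decoded ++ sym.toList) [] rest
    | none => pvALoop rev decoded buffer' rest

def shannon_fano_decode (encoded_text : String) (shannon_fano_codes : List (String × String)) : String :=
  -- reverse_shannon_fano_codes = {v: k for k, v in shannon_fano_codes.items()}
  String.ofList (pvALoop
    (shannon_fano_codes.foldl (fun d kv => d.insert kv.2 kv.1) PySem.Dict.empty)
    [] [] encoded_text.toList)

-- ===== PORT B =====
-- trie node: optional decoded symbol (a complete code ends here) + children (sibling list)
mutual
inductive PVTrie : Type where
  | node : Option String → PVChildren → PVTrie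
inductive PVChildren : Type where
  | nil : PVChildren
  | cons : Char → PVTrie → PVChildren → PVChildren
end

def pvChildGet : PVChildren → Char → Option PVTrie
  | .nil, _ => none
  | .cons c t rest, x => if x = c then some t else pvChildGet rest x

def pvChildSet : PVChildren → Char → PVTrie → PVChildren
  | .nil, x, t => .cons x t .nil
  | .cons c u rest, x, t => if x = c then .cons c t rest else .cons c u (pvChildSet rest x t)

-- node.setdefault-descent over the code, then node[None] = sym (overwrite: last wins)
def pvInsertTrie : PVTrie → List Char → String → PVTrie
  | .node _ ch, [], sym => .node (some sym) ch
  | .node tv ch, c :: cs, sym =>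
    let sub := (pvChildGet ch c).getD (.node none .nil)
    .node tv (pvChildSet ch c (pvInsertTrie sub cs sym))

def pvBuildTrie (shannon_fano_codes : List (String × String)) : PVTrie :=
  shannon_fano_codes.foldl (fun t kv => pvInsertTrie t kv.2.toList kv.1) (.node none .nil)

-- the per-bit loop of B: descend; dead end → stop; complete code → emit and reset to root
def pvBWalk (root : PVTrie) : PVTrie → List Char → List (List Char)
  | _, [] => []
  | .node _ ch, bit :: rest =>
    match pvChildGet ch bit with
    | none => []
    | some (.node (some sym) _) => sym.toList :: pvBWalk root root rest
    | some t => pvBWalk root t rest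

def shannon_fano_decode_alt (encoded_text : String) (shannon_fano_codes : List (String × String)) : String :=
  String.ofList (pvBWalk (pvBuildTrie shannon_fano_codes) (pvBuildTrie shannon_fano_codes)
    encoded_text.toList).flatten

-- ===== PRECONDITION & SPEC =====
def Spec_shannon_fano_decode (encoded_text : String) (shannon_fano_codes : List (String × String)) (out : String) : Prop := out = shannon_fano_decode_alt encoded_text shannon_fano_codes
instance (encoded_text : String) (shannon_fano_codes : List (String × String)) (out : String) : Decidable (Spec_shannon_fano_decode encoded_text shannon_fano_codes out) := by unfold Spec_shannon_fano_decode; infer_instance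

-- ===== CLAIM (what is proved, stated in full; the proofs are below) =====
def Claim_equal_shannon_fano_decode : Prop := ∀ (encoded_text : String) (shannon_fano_codes : List (String × String)), Dom_shannon_fano_decode encoded_text shannon_fano_codes → Spec_shannon_fano_decode encoded_text shannon_fano_codes (shannon_fano_decode encoded_text shannon_fano_codes)

-- ===== LEMMAS AND PROOFS =====

-- descend the trie along a string of characters
def pvLookupT : PVTrie → List Char → Option PVTrie
  | t, [] => some t
  | .node _ ch, c :: cs =>
    match pvChildGet ch c with
    | none => none
    | some t => pvLookupT t cs

def pvTermOf : PVTrie → Option String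
  | .node tv _ => tv

def pvTermAt (t : PVTrie) (s : List Char) : Option String :=
  (pvLookupT t s).bind pvTermOf

theorem pvChildGet_pvChildSet (ch : PVChildren) (c : Char) (t : PVTrie) (x : Char) :
    pvChildGet (pvChildSet ch c t) x = if x = c then some t else pvChildGet ch x := by
  match ch with
  | .nil => simp [pvChildSet, pvChildGet]
  | .cons c' u rest =>
    simp only [pvChildSet]
    by_cases h : c = c'
    · subst h; by_cases hx : x = c <;> simp [pvChildGet, hx]
    · simp only [if_neg h, pvChildGet, pvChildGet_pvChildSet rest c t x]
      by_cases hx : x = c'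
      · have hxc : x ≠ c := by rw [hx]; exact fun hh => h hh.symm
        have h' : c' ≠ c := fun hh => h hh.symm
        simp [hx, h']
      · simp [hx]

theorem pvTermAt_empty (s : List Char) : pvTermAt (.node none .nil) s = none := by
  cases s with
  | nil => rfl
  | cons c cs => simp [pvTermAt, pvLookupT, pvChildGet]

theorem pvTermAt_cons (tv : Option String) (ch : PVChildren) (c : Char) (cs : List Char) :
    pvTermAt (.node tv ch) (c :: cs) = (pvChildGet ch c).bind (fun t => pvTermAt t cs) := by
  simp only [pvTermAt, pvLookupT]
  cases pvChildGet ch c <;> rfl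

theorem pvTermAt_insert (ks : List Char) (t : PVTrie) (sym : String) (s : List Char) :
    pvTermAt (pvInsertTrie t ks sym) s = if s = ks then some sym else pvTermAt t s := by
  induction ks generalizing t s with
  | nil =>
    cases t with
    | node tv ch =>
      cases s with
      | nil => simp [pvInsertTrie, pvTermAt, pvLookupT, pvTermOf]
      | cons c cs => simp [pvInsertTrie, pvTermAt_cons]
  | cons k kt ih =>
    cases t with
    | node tv ch =>
      cases s with
      | nil => simp [pvInsertTrie, pvTermAt, pvLookupT, pvTermOf]
      | cons c cs =>
        rw [show pvInsertTrie (.node tv ch) (k :: kt) sym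
              = .node tv (pvChildSet ch k
                  (pvInsertTrie ((pvChildGet ch k).getD (.node none .nil)) kt sym)) from rfl]
        rw [pvTermAt_cons, pvChildGet_pvChildSet, pvTermAt_cons]
        by_cases hck : c = k
        · subst hck
          rw [if_pos rfl, Option.bind_some, ih]
          cases hg : pvChildGet ch c with
          | none => simp [pvTermAt_empty]
          | some u => simp
        · rw [if_neg hck]
          simp [hck]

theorem pvRev_eq_termAt (codes : List (String × String)) (d : PySem.Dict String String)
    (t : PVTrie) (h : ∀ s, d.get? (String.ofList s) = pvTermAt t s) :
    ∀ s, (codes.foldl (fun d kv => d.insert kv.2 kv.1) d).get? (String.ofList s)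
        = pvTermAt (codes.foldl (fun t kv => pvInsertTrie t kv.2.toList kv.1) t) s := by
  induction codes generalizing d t with
  | nil => exact h
  | cons kv rest ih =>
    simp only [List.foldl_cons]
    refine ih _ _ (fun s => ?_)
    rw [PySem.Dict.get?_insert, pvTermAt_insert, h]
    by_cases hs : s = kv.2.toList
    · subst hs; simp
    · have : String.ofList s ≠ kv.2 := by
        intro he
        exact hs (by rw [← he]; simp)
      simp [hs, this]

theorem pvLookupT_append (a b : List Char) (t : PVTrie) :
    pvLookupT t (a ++ b) = (pvLookupT t a).bind (fun u => pvLookupT u b) := by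
  induction a generalizing t with
  | nil => simp [pvLookupT]
  | cons c cs ih =>
    cases t with
    | node tv ch =>
      simp only [List.cons_append, pvLookupT]
      cases pvChildGet ch c with
      | none => rfl
      | some u => exact ih u

theorem pvALoop_dead (rev : PySem.Dict String String) (root : PVTrie)
    (hrel : ∀ s, rev.get? (String.ofList s) = pvTermAt root s)
    (bits : List Char) : ∀ decoded buffer, pvLookupT root buffer = none →
    pvALoop rev decoded buffer bits = decoded := by
  induction bits with
  | nil => intro decoded buffer _; rfl
  | cons bit rest ih =>
    intro decoded buffer hnone
    have hl : pvLookupT root (buffer ++ [bit]) = none := by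
      rw [pvLookupT_append, hnone]; rfl
    have hr : rev.get? (String.ofList (buffer ++ [bit])) = none := by
      rw [hrel, pvTermAt, hl]; rfl
    simp only [pvALoop, hr]
    exact ih _ _ hl

theorem pvALoop_walk (rev : PySem.Dict String String) (root : PVTrie)
    (hrel : ∀ s, rev.get? (String.ofList s) = pvTermAt root s)
    (bits : List Char) : ∀ decoded buffer cur, pvLookupT root buffer = some cur →
    pvALoop rev decoded buffer bits = decoded ++ (pvBWalk root cur bits).flatten := by
  induction bits with
  | nil => intro decoded buffer cur _; simp [pvALoop, pvBWalk]
  | cons bit rest ih =>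
    intro decoded buffer cur hcur
    cases cur with
    | node tv ch =>
      have hstep : pvLookupT root (buffer ++ [bit])
          = match pvChildGet ch bit with
            | none => none
            | some u => some u := by
        rw [pvLookupT_append, hcur]
        show pvLookupT (.node tv ch) [bit] = _
        simp only [pvLookupT]
      cases hg : pvChildGet ch bit with
      | none =>
        have hl : pvLookupT root (buffer ++ [bit]) = none := by rw [hstep, hg]
        have hr : rev.get? (String.ofList (buffer ++ [bit])) = none := by
          rw [hrel, pvTermAt, hl]; rfl
        simp only [pvALoop, hr, pvBWalk, hg]
        simpa using pvALoop_dead rev root hrel rest decoded _ hl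
      | some u =>
        have hl : pvLookupT root (buffer ++ [bit]) = some u := by rw [hstep, hg]
        have hr : rev.get? (String.ofList (buffer ++ [bit])) = pvTermOf u := by
          rw [hrel, pvTermAt, hl]; rfl
        cases u with
        | node utv uch =>
          cases utv with
          | some sym =>
            have hr' : rev.get? (String.ofList (buffer ++ [bit])) = some sym := by
              rw [hr]; rfl
            simp only [pvALoop, hr', pvBWalk, hg]
            rw [ih _ [] root (by rfl)]
            simp
          | none =>
            have hr' : rev.get? (String.ofList (buffer ++ [bit])) = none := by rw [hr]; rfl
            simp only [pvALoop, hr', pvBWalk, hg]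
            exact ih _ _ _ hl

-- ===== VERDICT (by name: the statement is the Claim_ definition above) =====
theorem shannon_fano_decode_spec : Claim_equal_shannon_fano_decode := by
  intro encoded_text shannon_fano_codes _
  show _ = _
  unfold shannon_fano_decode shannon_fano_decode_alt
  have hrel := pvRev_eq_termAt shannon_fano_codes PySem.Dict.empty (.node none .nil)
    (fun s => by rw [pvTermAt_empty]; rfl)
  rw [pvALoop_walk _ _ hrel _ [] [] (pvBuildTrie shannon_fano_codes) rfl]
  rfl
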